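-- pv_equiv track=rewrite | github.com/yukinari-takahashi/datatrove_custom | clean.py | extract_until_two_non_period_lines
-- ===== SOURCE A (Python) =====
-- def extract_until_two_non_period_lines(text: str) -> str:
--     """
--     空白行やピリオドで終わらない行をバッファにため込み、
--     ピリオド付き行が来たらバッファごと出力。
--     ただしピリオドで終わらない行が2行連続したらそこで中断し、バッファは破棄。
--     """
--     lines = text.splitlines()
--     result = ""
--     buffer = ""
--     non_period_streak = 0
--
--     for line in lines:
--         stripped = line.strip()
--
--         # ピリオド付き行なら、まずバッファをフラッシュしてから出力
--         if stripped.endswith('.'):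
--             result += buffer            # これまでの空白／非ピリオド行を出力
--             buffer = ""                 # バッファをクリア
--             result += line + "\n"       # 今回のピリオド行を出力
--             non_period_streak = 0       # 連続カウントをリセット
--
--         else:
--             # 空白行・ピリオド無し行はバッファにため込む
--             buffer += line + "\n"
--
--             # 実際のテキスト行（空白行以外）が非ピリオドなら連続カウント
--             if stripped:
--                 non_period_streak += 1
--                 if non_period_streak >= 2:
--                     # 2行連続非ピリオド → バッファ破棄＆中断
--                     break
--
--     return result.rstrip("\n")
-- ===== SOURCE B (Python) =====
-- def extract_until_two_non_period_lines(text: str) -> str: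
--     # Compute the cutoff index of the last flushed period line, then slice-join once.
--     lines = text.splitlines()
--     last_period = -1
--     streak = 0
--     for i, line in enumerate(lines):
--         stripped = line.strip()
--         if stripped.endswith('.'):
--             last_period = i
--             streak = 0
--         elif stripped:
--             streak += 1
--             if streak >= 2:
--                 break
--     return "\n".join(lines[:last_period + 1])
-- ===== Notes on version B (the rewrite author's own statement) =====
-- stated objective: simpler
-- what changed: Instead of accumulating result/buffer strings inside the loop, B only tracks the index of the last period-terminated line (and the non-period streak) and returns a single newline-join of the line slice up to that index.
import Mathlib
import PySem

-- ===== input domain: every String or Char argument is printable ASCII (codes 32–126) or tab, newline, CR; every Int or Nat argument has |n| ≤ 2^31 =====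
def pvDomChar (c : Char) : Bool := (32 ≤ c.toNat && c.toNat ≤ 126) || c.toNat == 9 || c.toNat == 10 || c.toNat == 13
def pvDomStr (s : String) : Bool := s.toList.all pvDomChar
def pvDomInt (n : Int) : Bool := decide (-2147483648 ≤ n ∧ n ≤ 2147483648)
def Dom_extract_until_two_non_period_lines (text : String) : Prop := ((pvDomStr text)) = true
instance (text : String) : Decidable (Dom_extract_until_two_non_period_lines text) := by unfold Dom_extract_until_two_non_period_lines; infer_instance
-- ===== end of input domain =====

-- B replaces A's result/buffer string accumulation by a cutoff-index scan plus one slice-join (objective: simpler).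

-- ===== PORT A =====
-- result.rstrip("\n") has no PySem primitive; exact hand port: drop trailing '\n' characters.
def pvRstripNlA (s : String) : String :=
  String.ofList ((s.toList.reverse.dropWhile (· == '\n')).reverse)

-- the `for line in lines` loop of A, state (result, buffer, non_period_streak); the `break` returns result
def pvCleanLoopA : List String → String → String → Nat → String
  | [], result, _buffer, _streak => result
  | line :: rest, result, buffer, streak =>
    let stripped := PySem.Str.strip line
    if PySem.Str.endswith stripped "." then
      pvCleanLoopA rest (result ++ buffer ++ (line ++ "\n")) "" 0
    else
      let buffer' := buffer ++ (line ++ "\n")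
      if stripped ≠ "" then
        if streak + 1 ≥ 2 then result
        else pvCleanLoopA rest result buffer' (streak + 1)
      else pvCleanLoopA rest result buffer' streak

def extract_until_two_non_period_lines (text : String) : String :=
  pvRstripNlA (pvCleanLoopA (PySem.Str.splitlines text) "" "" 0)

-- ===== PORT B =====
-- B's loop: enumerate(lines) tracking last_period and streak; returns last_period
def pvCutLoopB : List String → Int → Int → Nat → Int
  | [], _i, lastPeriod, _streak => lastPeriod
  | line :: rest, i, lastPeriod, streak =>
    let stripped := PySem.Str.strip line
    if PySem.Str.endswith stripped "." then
      pvCutLoopB rest (i + 1) i 0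
    else if stripped ≠ "" then
      if streak + 1 ≥ 2 then lastPeriod
      else pvCutLoopB rest (i + 1) lastPeriod (streak + 1)
    else pvCutLoopB rest (i + 1) lastPeriod streak

def extract_until_two_non_period_lines_alt (text : String) : String :=
  let lines := PySem.Str.splitlines text
  PySem.Str.join "\n" (PySem.List.slice lines none (some (pvCutLoopB lines 0 (-1) 0 + 1)))

-- ===== PRECONDITION & SPEC =====
def Spec_extract_until_two_non_period_lines (text : String) (out : String) : Prop := out = extract_until_two_non_period_lines_alt text
instance (text : String) (out : String) : Decidable (Spec_extract_until_two_non_period_lines text out) := by unfold Spec_extract_until_two_non_period_lines; infer_instance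

-- ===== CLAIM (what is proved, stated in full; the proofs are below) =====
def Claim_equal_extract_until_two_non_period_lines : Prop := ∀ (text : String), Dom_extract_until_two_non_period_lines text → Spec_extract_until_two_non_period_lines text (extract_until_two_non_period_lines text)

-- ===== LEMMAS AND PROOFS =====

-- number of lines both programs keep (proof-side characterisation)
def pvCut : Nat → List String → Nat
  | _, [] => 0
  | s, line :: rest =>
    let stripped := PySem.Str.strip line
    if PySem.Str.endswith stripped "." then pvCut 0 rest + 1
    else if stripped ≠ "" then
      if s + 1 ≥ 2 then 0
      else match pvCut (s + 1) rest with | 0 => 0 | Nat.succ j => j + 2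
    else match pvCut s rest with | 0 => 0 | Nat.succ j => j + 2

lemma pvCut_spec (l : List String) : ∀ s j, pvCut s l = j + 1 →
    ∃ h : j < l.length, PySem.Str.endswith (PySem.Str.strip l[j]) "." = true := by
  induction l with
  | nil => intro s j h; simp [pvCut] at h
  | cons line rest ih =>
    intro s j h
    simp only [pvCut] at h
    split_ifs at h with h1 h2 h3
    · cases j with
      | zero => exact ⟨by simp, by simpa using h1⟩
      | succ j' =>
        obtain ⟨hlt, hp⟩ := ih 0 j' (by omega)
        exact ⟨by simp; omega, by simpa using hp⟩
    · rcases hc : pvCut (s + 1) rest with _ | j' <;> rw [hc] at h <;> simp at h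
      · obtain ⟨hlt, hp⟩ := ih (s + 1) j' hc
        have hj : j = j' + 1 := by omega
        subst hj
        exact ⟨by simp; omega, by simpa using hp⟩
    · rcases hc : pvCut s rest with _ | j' <;> rw [hc] at h <;> simp at h
      · obtain ⟨hlt, hp⟩ := ih s j' hc
        have hj : j = j' + 1 := by omega
        subst hj
        exact ⟨by simp; omega, by simpa using hp⟩

lemma pvNlToList : ("\n" : String).toList = ['\n'] := by decide

lemma pvLoopA_eq (l : List String) : ∀ (res buf : String) (s : Nat),
    (pvCleanLoopA l res buf s).toList =
      if pvCut s l = 0 then res.toList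
      else res.toList ++ buf.toList ++ ((l.take (pvCut s l)).map (fun x => x.toList ++ ['\n'])).flatten := by
  induction l with
  | nil => intro res buf s; simp [pvCleanLoopA, pvCut]
  | cons line rest ih =>
    intro res buf s
    simp only [pvCleanLoopA, pvCut]
    by_cases h1 : PySem.Str.endswith (PySem.Str.strip line) "." = true
    · rw [if_pos h1, if_pos h1, ih]
      rcases hc : pvCut 0 rest with _ | j <;>
        simp [hc, String.toList_append, pvNlToList, List.take_succ_cons, List.append_assoc]
    · rw [if_neg h1, if_neg h1]
      by_cases h2 : PySem.Str.strip line ≠ ""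
      · rw [if_pos h2, if_pos h2]
        by_cases h3 : s + 1 ≥ 2
        · rw [if_pos h3, if_pos h3]; simp
        · rw [if_neg h3, if_neg h3, ih]
          rcases hc : pvCut (s + 1) rest with _ | j <;>
            simp [hc, String.toList_append, pvNlToList, List.take_succ_cons, List.append_assoc]
      · rw [if_neg h2, if_neg h2, ih]
        rcases hc : pvCut s rest with _ | j <;>
          simp [hc, String.toList_append, pvNlToList, List.take_succ_cons, List.append_assoc]

lemma pvLoopB_eq (l : List String) : ∀ (i lp : Int) (s : Nat),
    pvCutLoopB l i lp s = if pvCut s l = 0 then lp else i + pvCut s l - 1 := by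
  induction l with
  | nil => intro i lp s; simp [pvCutLoopB, pvCut]
  | cons line rest ih =>
    intro i lp s
    simp only [pvCutLoopB, pvCut]
    by_cases h1 : PySem.Str.endswith (PySem.Str.strip line) "." = true
    · rw [if_pos h1, if_pos h1, ih]
      rcases hc : pvCut 0 rest with _ | j <;> simp [hc] <;> omega
    · rw [if_neg h1, if_neg h1]
      by_cases h2 : PySem.Str.strip line ≠ ""
      · rw [if_pos h2, if_pos h2]
        by_cases h3 : s + 1 ≥ 2
        · rw [if_pos h3, if_pos h3]; simp
        · rw [if_neg h3, if_neg h3, ih]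
          rcases hc : pvCut (s + 1) rest with _ | j <;> simp [hc] <;> omega
      · rw [if_neg h2, if_neg h2, ih]
        rcases hc : pvCut s rest with _ | j <;> simp [hc] <;> omega

lemma pvFlatNl (zs : List (List Char)) (h : zs ≠ []) :
    (zs.map (fun x => x ++ ['\n'])).flatten = List.intercalate ['\n'] zs ++ ['\n'] := by
  induction zs with
  | nil => simp at h
  | cons x t ih =>
    cases t with
    | nil => simp [List.intercalate]
    | cons y t' =>
      have ihh := ih (by simp)
      simp only [List.map_cons, List.flatten_cons] at ihh ⊢
      rw [ihh]
      simp [List.intercalate, List.intersperse, List.append_assoc]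

lemma pvInterSnoc (sep y : List Char) (xs : List (List Char)) (h : xs ≠ []) :
    List.intercalate sep (xs ++ [y]) = List.intercalate sep xs ++ sep ++ y := by
  induction xs with
  | nil => simp at h
  | cons x t ih =>
    cases t with
    | nil => simp [List.intercalate, List.intersperse]
    | cons z t' =>
      have := ih (by simp)
      simp only [List.cons_append] at this ⊢
      simp [List.intercalate, List.intersperse] at this ⊢
      simpa [List.append_assoc] using this

lemma pvRstrip_flat (ys : List (List Char)) (hne : ys ≠ [])
    (hL : ys.getLast hne ≠ []) (hn : '\n' ∉ ys.getLast hne) :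
    (((ys.map (fun x => x ++ ['\n'])).flatten).reverse.dropWhile (· == '\n')).reverse
      = List.intercalate ['\n'] ys := by
  obtain ⟨dl, L, hys⟩ : ∃ dl L, ys = dl ++ [L] := ⟨ys.dropLast, ys.getLast hne, (List.dropLast_append_getLast hne).symm⟩
  have hgl : ys.getLast hne = L := by subst hys; simp
  rw [hgl] at hL hn
  subst hys
  rcases hLrev : L.reverse with _ | ⟨c, t⟩
  · exact absurd (by simpa using hLrev) hL
  have hc : c ∈ L := by
    have : c ∈ L.reverse := by rw [hLrev]; simp
    simpa using this
  have hcne : (c == '\n') = false := by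
    simp only [beq_eq_false_iff_ne]; intro hceq; exact hn (hceq ▸ hc)
  rw [List.map_append, List.flatten_append]
  simp only [List.map_cons, List.map_nil, List.flatten_cons, List.flatten_nil, List.append_nil]
  rw [List.reverse_append, List.reverse_append, List.reverse_cons]
  simp only [List.reverse_nil, List.nil_append, List.cons_append, List.dropWhile_cons,
    beq_self_eq_true, if_true, hLrev]
  rw [hcne]
  simp only [Bool.false_eq_true, if_false]
  rw [← List.cons_append, ← hLrev, List.reverse_append]
  simp only [List.reverse_reverse]
  cases dl with
  | nil => simp [List.intercalate]
  | cons d dt =>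
    rw [pvFlatNl (d :: dt) (by simp), pvInterSnoc ['\n'] L (d :: dt) (by simp)]

lemma pvGoNoNl (isB : Char → Bool) (h10 : isB '\n' = true) :
    ∀ (s cur : List Char) (acc : List (List Char)),
      (∀ p ∈ acc, '\n' ∉ p) → ('\n' ∉ cur) →
      ∀ p ∈ PySem.Chars.splitlines.go isB s cur acc, '\n' ∉ p := by
  intro s cur acc
  induction s, cur, acc using PySem.Chars.splitlines.go.induct isB with
  | case1 cur acc hemp =>
    intro hacc _ p hp
    rw [PySem.Chars.splitlines.go] at hp
    simp only [hemp, if_true, List.mem_reverse] at hp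
    exact hacc p hp
  | case2 cur acc hemp =>
    intro hacc hcur p hp
    rw [PySem.Chars.splitlines.go] at hp
    simp only [hemp, Bool.false_eq_true, if_false, List.mem_reverse, List.mem_cons] at hp
    rcases hp with h | h
    · subst h; simpa using hcur
    · exact hacc p h
  | case3 rest cur acc ih =>
    intro hacc hcur p hp
    rw [PySem.Chars.splitlines.go] at hp
    refine ih ?_ (by simp) p hp
    intro q hq
    rcases List.mem_cons.mp hq with h | h
    · subst h; simpa using hcur
    · exact hacc q h
  | case4 c rest cur acc hne hB ih =>
    intro hacc hcur p hp
    rw [PySem.Chars.splitlines.go] at hp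
    · rw [if_pos hB] at hp
      refine ih ?_ (by simp) p hp
      intro q hq
      rcases List.mem_cons.mp hq with h | h
      · subst h; simpa using hcur
      · exact hacc q h
    · exact hne
  | case5 c rest cur acc hne hB ih =>
    intro hacc hcur p hp
    rw [PySem.Chars.splitlines.go] at hp
    · rw [if_neg hB] at hp
      refine ih hacc ?_ p hp
      intro hmem
      rcases List.mem_cons.mp hmem with h | h
      · exact hB (h ▸ h10)
      · exact hcur h
    · exact hne

lemma pvSplitNoNl (text : String) : ∀ line ∈ PySem.Str.splitlines text, '\n' ∉ line.toList := by
  intro line hline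
  have hmem : line.toList ∈ (PySem.Str.splitlines text).map String.toList := List.mem_map_of_mem hline
  rw [PySem.Str.splitlines_map_toList] at hmem
  unfold PySem.Chars.splitlines at hmem
  exact pvGoNoNl _ (by decide) _ [] [] (by simp) (by simp) _ hmem

lemma pvMain (text : String) :
    extract_until_two_non_period_lines text = extract_until_two_non_period_lines_alt text := by
  unfold extract_until_two_non_period_lines extract_until_two_non_period_lines_alt
  apply String.toList_inj.mp
  dsimp only
  rw [pvLoopB_eq]
  have hA : ∀ u : String, (pvRstripNlA u).toList = (u.toList.reverse.dropWhile (· == '\n')).reverse := by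
    intro u; simp [pvRstripNlA, String.toList_ofList]
  rw [hA]
  by_cases hk : pvCut 0 (PySem.Str.splitlines text) = 0
  · rw [if_pos hk, pvLoopA_eq, if_pos hk]
    have h0 : (-1 : Int) + 1 = 0 := by norm_num
    rw [h0, PySem.List.slice_to _ (le_refl (0 : Int))]
    simp [PySem.Str.toList_join, PySem.Chars.join, List.intercalate]
  · rcases Nat.exists_eq_succ_of_ne_zero hk with ⟨j, hj⟩
    obtain ⟨hjlt, hp⟩ := pvCut_spec (PySem.Str.splitlines text) 0 j hj
    rw [if_neg hk, pvLoopA_eq, if_neg hk]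
    have h1 : (0 : Int) + (pvCut 0 (PySem.Str.splitlines text) : Int) - 1 + 1
        = (pvCut 0 (PySem.Str.splitlines text) : Int) := by ring
    rw [h1, PySem.List.slice_to _ (by positivity : (0:Int) ≤ (pvCut 0 (PySem.Str.splitlines text) : Int))]
    rw [Int.toNat_natCast]
    set lines := PySem.Str.splitlines text with hlines
    set k := pvCut 0 lines with hkdef
    -- rewrite A's flatten through ys := (lines.take k).map String.toList
    have hmapmap : (lines.take k).map (fun x => x.toList ++ ['\n'])
        = ((lines.take k).map String.toList).map (fun x => x ++ ['\n']) := by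
      rw [List.map_map]; rfl
    simp only [show ("" : String).toList = [] from rfl, List.nil_append]
    rw [hmapmap]
    set ys := (lines.take k).map String.toList with hys
    have hyslen : ys.length = k := by
      rw [hys, List.length_map, List.length_take]; omega
    have hne : ys ≠ [] := by
      intro h0; rw [h0] at hyslen; simp at hyslen; omega
    have hgl : ys.getLast hne = lines[j].toList := by
      rw [List.getLast_eq_getElem]
      have hidx : ys.length - 1 = j := by omega
      have h2 : ys[ys.length - 1]'(by omega) = ys[j]'(by omega) := getElem_congr rfl hidx (by omega)
      rw [h2]
      simp only [hys, List.getElem_map, List.getElem_take]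
    have hLne : lines[j].toList ≠ [] := by
      intro h0
      have hsfx : ('.' :: []) <:+ (PySem.Str.strip lines[j]).toList :=
        (PySem.Chars.endswith_iff _ _).mp (by simpa using hp)
      rw [PySem.Str.toList_strip, h0] at hsfx
      have : PySem.Chars.strip ([] : List Char) = [] := rfl
      rw [this] at hsfx
      simp at hsfx
    have hn : '\n' ∉ lines[j].toList :=
      pvSplitNoNl text lines[j] (List.getElem_mem hjlt)
    rw [pvRstrip_flat ys hne (hgl ▸ hLne) (hgl ▸ hn)]
    rw [PySem.Str.toList_join]
    simp [PySem.Chars.join, pvNlToList, hys]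

-- ===== VERDICT (by name: the statement is the Claim_ definition above) =====
theorem extract_until_two_non_period_lines_spec : Claim_equal_extract_until_two_non_period_lines := by
  intro text _hdom
  exact pvMain text
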